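-- pv_equiv track=rewrite | github.com/BasselAbdelkader/alpine-iolta-guard | backend/apps/clients/utils/quickbooks_importer.py | _group_by_client
-- ===== SOURCE A (Python) =====
-- from typing import Dict, List, Tuple
--
-- def _group_by_client(data: List[Dict]) -> Dict[str, List[Dict]]:
--     """
--     Group transactions by client name.
--
--     Args:
--         data: Validated transaction data
--
--     Returns:
--         dict: {client_name: [transactions]}
--     """
--     grouped = {}
--     for row in data:
--         client = row['account']
--         if client not in grouped:
--             grouped[client] = []
--         grouped[client].append(row)
--     return grouped
-- ===== SOURCE B (Python) =====
-- def _group_by_client(data):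
--     """Group transactions by client name: distinct account names in first-occurrence
--     order, then one filter pass per client (instead of hash-based accumulation)."""
--     clients = list(dict.fromkeys(row['account'] for row in data))
--     return {c: [row for row in data if row['account'] == c] for c in clients}
-- ===== Notes on version B (the rewrite author's own statement) =====
-- stated objective: alternative
-- what changed: Replaces the single-pass dict accumulation with a two-pass decomposition: first collect the distinct account names in first-occurrence order with dict.fromkeys, then build each group by a per-client filter over the data.
import Mathlib
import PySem

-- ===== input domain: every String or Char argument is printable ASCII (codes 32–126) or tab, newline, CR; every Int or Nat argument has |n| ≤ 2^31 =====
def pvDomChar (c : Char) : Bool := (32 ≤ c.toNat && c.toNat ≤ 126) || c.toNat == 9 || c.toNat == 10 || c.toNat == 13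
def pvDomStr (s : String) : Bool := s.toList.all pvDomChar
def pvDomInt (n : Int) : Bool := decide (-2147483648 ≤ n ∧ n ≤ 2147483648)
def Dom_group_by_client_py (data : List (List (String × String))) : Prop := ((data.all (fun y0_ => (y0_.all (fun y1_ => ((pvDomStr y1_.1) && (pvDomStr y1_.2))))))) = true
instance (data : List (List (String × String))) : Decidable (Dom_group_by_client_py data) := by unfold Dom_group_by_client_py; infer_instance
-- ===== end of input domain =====

-- B replaces the one-pass dict accumulation by a two-pass decomposition (ordered distinct keys, then a filter per key); not faster, alternative structure.

-- row['account'] (first matching pair; Pre_ guarantees the key is present, so the default is never used there)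
def pvAcct (row : List (String × String)) : String :=
  ((row.find? (fun p => p.1 == "account")).map (·.2)).getD ""

-- ===== PORT A =====
def group_by_client_py (data : List (List (String × String))) : List (String × List (List (String × String))) :=
  (data.foldl (fun g row =>
      let client := pvAcct row
      let g' := if g.contains client then g else g.insert client []
      g'.modify client [] (fun l => l ++ [row]))
    (PySem.Dict.empty : PySem.Dict String (List (List (String × String))))).items

-- ===== PORT B =====
def group_by_client_py_alt (data : List (List (String × String))) : List (String × List (List (String × String))) :=
  (PySem.List.dedup (data.map pvAcct)).map
    (fun c => (c, data.filter (fun row => pvAcct row == c)))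

-- ===== PRECONDITION & SPEC =====
-- Pre_ excludes rows without an 'account' key: on those the Python A raises KeyError (B raises there too).
def Pre_group_by_client_py (data : List (List (String × String))) : Prop :=
  (data.all (fun row => (row.find? (fun p => p.1 == "account")).isSome)) = true
instance (data : List (List (String × String))) : Decidable (Pre_group_by_client_py data) := by unfold Pre_group_by_client_py; infer_instance

def pvWitness_group_by_client_py : (List (List (String × String))) :=
  [[("account", "alice"), ("amount", "10")], [("account", "bob")], [("account", "alice"), ("amount", "3")]]

def Spec_group_by_client_py (data : List (List (String × String))) (out : List (String × List (List (String × String)))) : Prop := out = group_by_client_py_alt data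
instance (data : List (List (String × String))) (out : List (String × List (List (String × String)))) : Decidable (Spec_group_by_client_py data out) := by unfold Spec_group_by_client_py; infer_instance

-- ===== CLAIM (what is proved, stated in full; the proofs are below) =====
def Claim_equal_group_by_client_py : Prop := ∀ (data : List (List (String × String))), Dom_group_by_client_py data → Pre_group_by_client_py data → Spec_group_by_client_py data (group_by_client_py data)

-- ===== LEMMAS AND PROOFS =====

-- Dict.modify is insert of the modified value (items agree definitionally).
lemma pv_modify_eq (d : PySem.Dict String (List (List (String × String)))) (k : String)
    (f : List (List (String × String)) → List (List (String × String))) :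
    d.modify k [] f = d.insert k (f (d.getD k [])) :=
  PySem.Dict.ext_iff.mpr rfl

-- A's loop body ('setdefault to [] then append') is exactly one modify.
lemma pv_step_eq (g : PySem.Dict String (List (List (String × String)))) (row : List (String × String)) :
    (let client := pvAcct row
     let g' := if g.contains client then g else g.insert client []
     g'.modify client [] (fun l => l ++ [row]))
    = g.modify (pvAcct row) [] (fun l => l ++ [row]) := by
  simp only []
  by_cases h : g.contains (pvAcct row)
  · simp [h]
  · simp only [h, Bool.false_eq_true, if_false]
    rw [pv_modify_eq, pv_modify_eq, PySem.Dict.getD_insert_self, PySem.Dict.insert_insert_self]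
    have hg : g.getD (pvAcct row) [] = [] := by
      apply PySem.Dict.getD_of_not_contains; simpa using h
    rw [hg]

lemma pv_filter_map_snd (data : List (List (String × String))) (c : String) :
    ((data.map (fun r => (pvAcct r, r))).filter (fun p => p.1 == c)).map (·.2)
    = data.filter (fun r => pvAcct r == c) := by
  induction data with
  | nil => rfl
  | cons r rs ih =>
    by_cases h : pvAcct r == c <;> simp [h, ih]

lemma pv_main (data : List (List (String × String))) :
    group_by_client_py data = group_by_client_py_alt data := by
  unfold group_by_client_py group_by_client_py_alt
  have hstep : (fun (g : PySem.Dict String (List (List (String × String)))) row =>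
      let client := pvAcct row
      let g' := if g.contains client then g else g.insert client []
      g'.modify client [] (fun l => l ++ [row]))
      = fun g row => g.modify (pvAcct row) [] (fun l => l ++ [row]) := by
    funext g row; exact pv_step_eq g row
  rw [hstep]
  have hmap : data.foldl (fun g row => g.modify (pvAcct row) [] (fun l => l ++ [row]))
        (PySem.Dict.empty : PySem.Dict String (List (List (String × String))))
      = (data.map (fun r => (pvAcct r, r))).foldl
          (fun d p => d.modify p.1 [] (fun l => l ++ [p.2])) PySem.Dict.empty := by
    rw [List.foldl_map]
  rw [hmap]
  set pairs := data.map (fun r => (pvAcct r, r)) with hpairs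
  set D := pairs.foldl (fun d p => d.modify p.1 [] (fun l => l ++ [p.2])) PySem.Dict.empty with hD
  have hkeys : D.keys = PySem.List.dedup (data.map pvAcct) := by
    rw [hD, PySem.Dict.keys_foldl_modify_key pairs Prod.fst []
          (fun _ p => (fun l => l ++ [p.2])) PySem.Dict.empty]
    simp only [hpairs, PySem.Dict.keys_empty, PySem.Set.update_nil_left, List.map_map,
      PySem.List.dedup_eq_ofList]
    rfl
  have hnodup : D.keys.Nodup := by
    rw [hkeys]; exact PySem.List.nodup_dedup _
  rw [PySem.Dict.items_eq_map_keys D hnodup [], hkeys]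
  apply List.map_congr_left
  intro c hc
  have hgetD : D.getD c [] = data.filter (fun row => pvAcct row == c) := by
    rw [hD, PySem.Dict.getD_foldl_modify_append, PySem.Dict.getD_empty, hpairs,
        pv_filter_map_snd]
    simp
  rw [hgetD]

-- ===== VERDICT (by name: the statement is the Claim_ definition above) =====
theorem group_by_client_py_spec : Claim_equal_group_by_client_py := by
  intro data _ _
  unfold Spec_group_by_client_py
  exact pv_main data
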